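-- pv_equiv track=rewrite | github.com/fffree/isograms | scripts/isograms.py | isogram
-- ===== SOURCE A (Python) =====
-- def isogram(candidate):
--     """Returns the order of isogram for a given string.
--
--     The function returns 0 if the given string is not an isogram.
--
--     Some examples:
--     "abca"   -- not an isogram, returns 0
--     "abcd"   -- a 1-isogram, returns 1
--     "abab"   -- a 2-isogram, returns 2
--     "ababab" -- a 3-isogram, returns 3
--     ...
--
--     Note that this function will treat each character as unique, thus while
--     "abab" and "AbAb" will be treated as a 2-isogram, "ab ab", "Abab", "ab-ab",
--     "aBab", etc. will not be recognised as isograms. You may want to strip all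
--     extra characters and whitespace, as well as irrelevant diacritics and either
--     uppercase or lowercase the entire string before using this function.
--
--     Keyword arguments:
--     candidate -- the string to be examined
--     """
--     #Count occurences of each letter
--     letters = {}
--     for letter in candidate:
--         if letter in letters:
--             letters[letter] += 1
--         else:
--             letters[letter] = 1
--     #Establish order of isogram
--     order = 0
--     for k in letters:
--         if order == 0:
--             order = letters[k] #Set "order" to count of first letter
--         if order != letters[k]: #Check if all letters are of same order
--             return 0 #Letter count differs -> this is not an isogram
--     return order #No letter count differences -> this is an n-isogram
-- ===== SOURCE B (Python) =====
-- def isogram(candidate):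
--     """Returns the order of isogram for a given string (0 if not an isogram).
--
--     Arithmetic re-implementation: an n-character string with k distinct
--     characters is an isogram of order q only if n == k*q; check that
--     divisibility first, then verify each distinct character occurs q times.
--     """
--     if not candidate:
--         return 0
--     distinct = set(candidate)
--     q, r = divmod(len(candidate), len(distinct))
--     if r:
--         return 0
--     if all(sum(ch == c for ch in candidate) == q for c in distinct):
--         return q
--     return 0
-- ===== Notes on version B (the rewrite author's own statement) =====
-- stated objective: alternative
-- what changed: Replaces A's dict-of-counts pass plus verify-all-values loop by an arithmetic feasibility check (len(candidate) must be divisible by the number of distinct characters, giving the candidate order q) followed by verifying that each distinct character occurs exactly q times.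
import Mathlib
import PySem

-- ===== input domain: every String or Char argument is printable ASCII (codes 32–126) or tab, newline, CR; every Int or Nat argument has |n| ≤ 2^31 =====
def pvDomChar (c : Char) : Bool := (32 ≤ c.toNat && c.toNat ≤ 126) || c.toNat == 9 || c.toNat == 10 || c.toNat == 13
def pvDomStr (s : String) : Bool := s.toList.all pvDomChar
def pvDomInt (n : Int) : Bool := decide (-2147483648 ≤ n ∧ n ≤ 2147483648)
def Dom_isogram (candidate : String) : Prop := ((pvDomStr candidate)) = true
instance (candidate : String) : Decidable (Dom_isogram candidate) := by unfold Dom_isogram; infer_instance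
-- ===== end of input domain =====

-- B replaces A's count-then-verify dict loops by a divisibility check plus per-character occurrence verification (alternative algorithm, no speed claim).

-- ===== PORT A =====
-- A's second loop: 'for k in letters: ...' with its early 'return 0'.
-- 'letters[k]' is ported as 'letters.getD k 0': k always comes from letters.keys, so the
-- KeyError branch of Python's letters[k] is unreachable and getD is exact here.
def pvCheckA (letters : PySem.Dict Char Int) : List Char → Int → Int
  | [], order => order
  | k :: ks, order =>
    let order' := if order = 0 then letters.getD k 0 else order
    if order' ≠ letters.getD k 0 then 0 else pvCheckA letters ks order'

def isogram (candidate : String) : Int :=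
  let letters := candidate.toList.foldl
    (fun d letter =>
      if d.contains letter then d.insert letter (d.getD letter 0 + 1)
      else d.insert letter 1)
    PySem.Dict.empty
  pvCheckA letters letters.keys 0

-- ===== PORT B =====
def isogram_alt (candidate : String) : Int :=
  let l := candidate.toList
  if l = [] then 0
  else
    let distinct : PySem.Set Char := PySem.Set.ofList l
    match PySem.Int.divmod? (PySem.Str.len candidate) (PySem.List.len distinct) with
    | none => 0  -- unreachable: distinct is nonempty here
    | some (q, r) =>
      if r ≠ 0 then 0
      else if distinct.all (fun c => (l.map (fun ch => if ch == c then (1 : Int) else 0)).sum == q)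
        then q else 0

-- ===== PRECONDITION & SPEC =====
def Spec_isogram (candidate : String) (out : Int) : Prop := out = isogram_alt candidate
instance (candidate : String) (out : Int) : Decidable (Spec_isogram candidate out) := by unfold Spec_isogram; infer_instance

-- ===== CLAIM (what is proved, stated in full; the proofs are below) =====
def Claim_equal_isogram : Prop := ∀ (candidate : String), Dom_isogram candidate → Spec_isogram candidate (isogram candidate)

-- ===== LEMMAS AND PROOFS =====

-- A's verification loop, once the order is a nonzero value: it returns that value iff every
-- remaining key has that count, else 0.
theorem pvCheckA_of_ne_zero (d : PySem.Dict Char Int) (ks : List Char) (order : Int)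
    (h : order ≠ 0) :
    pvCheckA d ks order = if ∀ c ∈ ks, d.getD c 0 = order then order else 0 := by
  induction ks with
  | nil => simp [pvCheckA]
  | cons k ks ih =>
    simp only [pvCheckA, if_neg h]
    by_cases hk : d.getD k 0 = order
    · rw [if_neg (by simp [hk]), ih]
      simp [hk]
    · rw [if_pos (fun he => hk he.symm), if_neg]
      push Not
      exact ⟨k, List.mem_cons_self, hk⟩

-- the length of a list is the sum of the multiplicities of its distinct elements
theorem length_eq_sum_counts (l : List Char) :
    l.length = ((PySem.Set.ofList l).map (fun c => l.count c)).sum := by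
  have hperm : (PySem.Set.ofList l).Perm l.dedup := by
    rw [List.perm_ext_iff_of_nodup (PySem.Set.nodup_ofList l) (List.nodup_dedup l)]
    intro a
    simp [PySem.Set.mem_ofList, List.mem_dedup]
  rw [(hperm.map (fun c => l.count c)).sum_eq]
  exact (List.sum_map_count_dedup_eq_length l).symm

-- ===== VERDICT (by name: the statement is the Claim_ definition above) =====
theorem isogram_spec : Claim_equal_isogram := by
  intro candidate _
  show isogram candidate = isogram_alt candidate
  unfold isogram isogram_alt
  have hfold : candidate.toList.foldl
      (fun d letter =>
        if d.contains letter then d.insert letter (d.getD letter 0 + 1)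
        else d.insert letter 1) PySem.Dict.empty
      = PySem.Dict.counter candidate.toList := by
    refine (PySem.List.foldl_congr_mem candidate.toList _
      (fun (d : PySem.Dict Char Int) x => d.insert x (d.getD x 0 + 1)) PySem.Dict.empty
      ?_).trans (PySem.Dict.foldl_insert_getD_add_one_eq_counter candidate.toList)
    intro acc x _
    by_cases hc : acc.contains x = true
    · simp [hc]
    · simp [hc, PySem.Dict.getD_of_not_contains acc 0 (by simpa using hc)]
  simp only [hfold, PySem.Dict.keys_counter, PySem.Str.len_eq]
  generalize candidate.toList = l
  rcases hl : l with _ | ⟨c0, rest⟩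
  · simp [pvCheckA]
  · rw [← hl]
    have hlne : l ≠ [] := by rw [hl]; exact List.cons_ne_nil _ _
    obtain ⟨k0, kt, hks⟩ : ∃ k0 kt, PySem.Set.ofList l = k0 :: kt := by
      rw [hl, PySem.Set.ofList_cons]; exact ⟨_, _, rfl⟩
    have hk0l : k0 ∈ l := by
      have : k0 ∈ PySem.Set.ofList l := by rw [hks]; exact List.mem_cons_self
      exact (PySem.Set.mem_ofList l k0).mp this
    have hv0 : 0 < List.count k0 l := List.count_pos_iff.mpr hk0l
    have hsum : ∀ c : Char,
        (l.map (fun ch => if ch == c then (1 : Int) else 0)).sum = (List.count c l : Int) := by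
      intro c
      rw [PySem.List.sum_map_ite_one_zero]
      rfl
    rw [hks, if_neg hlne]
    have hstep : pvCheckA (PySem.Dict.counter l) (k0 :: kt) 0
        = pvCheckA (PySem.Dict.counter l) kt ((List.count k0 l : Int)) := by
      simp [pvCheckA, PySem.Dict.getD_counter]
    rw [hstep, pvCheckA_of_ne_zero _ _ _ (by exact_mod_cast hv0.ne')]
    simp only [PySem.Dict.getD_counter]
    have hkpos : (0 : Int) < PySem.List.len (k0 :: kt) := by
      rw [PySem.List.len_eq]
      simp
    have hdm : PySem.Int.divmod? (l.length : Int) (PySem.List.len (k0 :: kt))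
        = some (PySem.Int.floordiv (l.length : Int) (PySem.List.len (k0 :: kt)),
                PySem.Int.mod (l.length : Int) (PySem.List.len (k0 :: kt))) := by
      simp [PySem.Int.divmod?, PySem.Int.floordiv, PySem.Int.mod]
      omega
    simp only [hdm, hsum]
    by_cases hP : ∀ c ∈ kt, (List.count c l : Int) = (List.count k0 l : Int)
    · have hall : ∀ c ∈ k0 :: kt, List.count c l = List.count k0 l := by
        intro c hc
        rcases List.mem_cons.mp hc with h | h
        · rw [h]
        · exact_mod_cast hP c h
      have hlen : (l.length : Int)
          = PySem.List.len (k0 :: kt) * (List.count k0 l : Int) := by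
        have h1 : l.length = ((k0 :: kt).map (fun c => List.count c l)).sum := by
          rw [length_eq_sum_counts l, hks]
        have h2 : ((k0 :: kt).map (fun c => List.count c l)).sum
            = (k0 :: kt).length * List.count k0 l := by
          rw [List.map_congr_left hall]
          simp [List.map_const', mul_comm]
          ring
        rw [PySem.List.len_eq]
        push_cast [h1, h2]
        ring
      have hmod : PySem.Int.mod (l.length : Int) (PySem.List.len (k0 :: kt)) = 0 :=
        (PySem.Int.mod_eq_zero_iff_dvd _ _).mpr ⟨_, hlen⟩
      have hdiv : PySem.Int.floordiv (l.length : Int) (PySem.List.len (k0 :: kt))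
          = (List.count k0 l : Int) := by
        rw [PySem.Int.floordiv_eq_ediv_of_pos hkpos, hlen,
          Int.mul_ediv_cancel_left _ hkpos.ne']
      rw [if_pos hP, hmod, hdiv]
      simp only [ne_eq, not_true_eq_false, if_false]
      rw [if_pos]
      simp only [List.all_eq_true, beq_iff_eq]
      intro c hc
      exact_mod_cast hall c hc
    · rw [if_neg hP]
      by_cases hm : PySem.Int.mod (l.length : Int) (PySem.List.len (k0 :: kt)) = 0
      · rw [hm]
        simp only [ne_eq, not_true_eq_false, if_false]
        rw [if_neg]
        simp only [List.all_eq_true, beq_iff_eq]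
        intro hAll
        apply hP
        intro c hc
        have hq := hAll c (List.mem_cons_of_mem _ hc)
        have hq0 := hAll k0 List.mem_cons_self
        rw [hq, hq0]
      · rw [if_pos hm]
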